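-- pv_equiv track=rewrite | github.com/Ventarri/discrete_math_class | discrete_math_gui_python.py | decrypt_plaintext
-- ===== SOURCE A (Python) =====
-- ALPHA = {'A': '01', 'B': '02', 'C': '03', 'D': '04', 'E': '05', 'F': '06', 'G': '07', 'H': '08', 'I': '09',
--               'J': '10', 'K': '11', 'L': '12', 'M': '13', 'N': '14', 'O': '15', 'P': '16', 'Q': '17', 'R': '18',
--               'S': '19', 'T': '20', 'U': '21', 'V': '22', 'W': '23', 'X': '24', 'Y': '25', 'Z': '26', ' ': '27'}
--
-- def decrypt_plaintext(c, b_priv_key):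
--     c = c.split(",")
--     c = c[0].split(" ")
--
--     n, d = b_priv_key[1]
--     n = int(n)
--     d = int(d)
--
--     decrypt_numtext = ""
--     for i in c:
--         i = int(i)
--         num = pow(i, d, n)
--         num = str(num)
--         if len(num) % 2 != 0:
--             num = "0" + num
--         decrypt_numtext += num
--
--     plaintext = ""
--     for j in range(0, len(decrypt_numtext), 2):
--         val = decrypt_numtext[j:j + 2]
--         for key, value in ALPHA.items():
--             if ALPHA[key] == val:
--                 plaintext += key
--                 break
--
--     return str(plaintext)
-- ===== SOURCE B (Python) =====
-- # Arithmetic decoder: instead of str-concatenation + 2-char chunking + scanning ALPHA,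
-- # decode each pow-result by base-100 digit extraction, mapping codes 1-26 to letters and 27 to space.
-- def decrypt_plaintext(c, b_priv_key):
--     n, d = b_priv_key[1]
--     n = int(n)
--     d = int(d)
--
--     out = []
--     for tok in c.split(",")[0].split(" "):
--         m = pow(int(tok), d, n)
--         letters = []
--         while m > 0:
--             m, code = divmod(m, 100)
--             if 1 <= code <= 27:
--                 letters.append(' ' if code == 27 else chr(64 + code))
--         out.extend(reversed(letters))
--     return "".join(out)
-- ===== Notes on version B (the rewrite author's own statement) =====
-- stated objective: alternative
-- what changed: Replaces A's global digit-string concatenation, 2-char re-chunking pass and linear ALPHA scan per pair by per-number base-100 digit extraction (divmod) with an arithmetic code-to-letter map, building each number's letters back-to-front.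
-- outside the precondition, e.g. on decrypt_plaintext('9', [('x', 'y'), ('-1000', '2')]): A returns 'S', B returns ''; on decrypt_plaintext('3', [('x', 'y'), ('7', '-1')]): A returns 'E', B returns 'E'
import Mathlib
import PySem

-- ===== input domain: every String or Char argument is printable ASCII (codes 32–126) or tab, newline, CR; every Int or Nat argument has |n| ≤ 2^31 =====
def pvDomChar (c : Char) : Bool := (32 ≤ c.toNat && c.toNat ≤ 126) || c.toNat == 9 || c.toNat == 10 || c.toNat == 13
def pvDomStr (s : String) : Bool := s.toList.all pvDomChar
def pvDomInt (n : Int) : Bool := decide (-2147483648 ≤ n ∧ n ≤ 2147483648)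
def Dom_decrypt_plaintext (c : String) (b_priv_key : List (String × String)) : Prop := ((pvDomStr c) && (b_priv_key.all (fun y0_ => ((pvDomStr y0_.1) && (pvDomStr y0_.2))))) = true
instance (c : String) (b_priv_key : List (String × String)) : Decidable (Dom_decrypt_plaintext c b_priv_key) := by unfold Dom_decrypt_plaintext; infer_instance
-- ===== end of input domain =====

-- B replaces A's string pipeline (concatenate padded str(pow) results, re-chunk into 2-char pairs, scan ALPHA
-- for each pair) by per-number base-100 digit extraction with an arithmetic code→letter map (objective: alternative).


-- ===== PORT A =====
-- shared parsing prelude (identical lines in both Pythons): c.split(",")[0].split(" ") and the key pair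
def pvTokens (c : String) : List (List Char) :=
  let cs := (PySem.Chars.split? c.toList [',']).getD []
  (PySem.Chars.split? (cs.getD 0 []) [' ']).getD []

-- n, d = b_priv_key[1]; n = int(n); d = int(d)   (Pre_ guarantees the index and both parses succeed)
def pvKeyND (b_priv_key : List (String × String)) : Int × Int :=
  let nd := PySem.List.pyGetD b_priv_key 1 ("", "")
  ((PySem.Int.ofStr? nd.1).getD 0, (PySem.Int.ofStr? nd.2).getD 0)

def pvALPHA : PySem.Dict (List Char) (List Char) :=
  ⟨[(['A'], ['0','1']), (['B'], ['0','2']), (['C'], ['0','3']), (['D'], ['0','4']), (['E'], ['0','5']),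
   (['F'], ['0','6']), (['G'], ['0','7']), (['H'], ['0','8']), (['I'], ['0','9']), (['J'], ['1','0']),
   (['K'], ['1','1']), (['L'], ['1','2']), (['M'], ['1','3']), (['N'], ['1','4']), (['O'], ['1','5']),
   (['P'], ['1','6']), (['Q'], ['1','7']), (['R'], ['1','8']), (['S'], ['1','9']), (['T'], ['2','0']),
   (['U'], ['2','1']), (['V'], ['2','2']), (['W'], ['2','3']), (['X'], ['2','4']), (['Y'], ['2','5']),
   (['Z'], ['2','6']), ([' '], ['2','7'])]⟩

-- A's "if len(num) % 2 != 0: num = '0' + num"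
def pvPad (s : List Char) : List Char :=
  if PySem.Int.mod (PySem.List.len s) 2 ≠ 0 then '0' :: s else s

-- A's inner "for key, value in ALPHA.items(): if ALPHA[key] == val: plaintext += key; break"
def pvScanAlpha : List (List Char × List Char) → List Char → List Char
  | [], _ => []
  | (k, _) :: rest, val =>
      if PySem.Dict.getD pvALPHA k [] == val then k else pvScanAlpha rest val

-- A's "for j in range(0, len(decrypt_numtext), 2): val = decrypt_numtext[j:j+2]; <scan ALPHA>"
def pvChunkLoop : List Char → List Char
  | a :: b :: rest => pvScanAlpha pvALPHA.items [a, b] ++ pvChunkLoop rest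
  | [a] => pvScanAlpha pvALPHA.items [a]
  | [] => []

-- exponent d is ported as d.toNat: Pre_ restricts to 0 ≤ d, where pow(i, d, n) = powMod i d.toNat n exactly
def decrypt_plaintext (c : String) (b_priv_key : List (String × String)) : String :=
  let toks := pvTokens c
  let nd := pvKeyND b_priv_key
  let numtext := toks.foldl (fun acc t =>
    let i := (PySem.Int.ofChars? t).getD 0
    acc ++ pvPad (PySem.Int.toChars (PySem.Int.powMod i nd.2.toNat nd.1))) []
  String.ofList (pvChunkLoop numtext)

-- ===== PORT B =====
-- B's "while m > 0: m, code = divmod(m, 100); if 1 <= code <= 27: letters.append(...)"  (letters, LSB first)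
def pvLettersLoop (m : Int) : List Char :=
  if _h : m ≤ 0 then [] else
    (if 1 ≤ PySem.Int.mod m 100 ∧ PySem.Int.mod m 100 ≤ 27 then
       [if PySem.Int.mod m 100 = 27 then ' ' else Char.ofNat (64 + (PySem.Int.mod m 100).toNat)]
     else []) ++ pvLettersLoop (PySem.Int.floordiv m 100)
termination_by m.toNat
decreasing_by
  rw [PySem.Int.floordiv_eq_ediv_of_pos (by norm_num)]
  omega

def decrypt_plaintext_alt (c : String) (b_priv_key : List (String × String)) : String :=
  let toks := pvTokens c
  let nd := pvKeyND b_priv_key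
  let out := toks.foldl (fun acc t =>
    let m := PySem.Int.powMod ((PySem.Int.ofChars? t).getD 0) nd.2.toNat nd.1
    acc ++ (pvLettersLoop m).reverse) []
  String.ofList out

-- ===== PRECONDITION & SPEC =====
-- Pre_ excludes inputs where A raises (key list shorter than 2, unparseable n/d or ciphertext tokens, n = 0,
-- and d < 0, where Python pow demands a modular inverse and raises whenever none exists) and additionally n < 0:
-- there A's pairing of '-'-bearing digit strings and B's empty decode of negative residues are both accidental
-- readings of a corner (a negative RSA modulus) no one would specify.
def Pre_decrypt_plaintext (c : String) (b_priv_key : List (String × String)) : Prop :=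
  2 ≤ b_priv_key.length ∧
  (PySem.Int.ofStr? (PySem.List.pyGetD b_priv_key 1 ("", "")).1).isSome = true ∧
  (PySem.Int.ofStr? (PySem.List.pyGetD b_priv_key 1 ("", "")).2).isSome = true ∧
  0 < (pvKeyND b_priv_key).1 ∧ 0 ≤ (pvKeyND b_priv_key).2 ∧
  ∀ t ∈ pvTokens c, (PySem.Int.ofChars? t).isSome = true
instance (c : String) (b_priv_key : List (String × String)) : Decidable (Pre_decrypt_plaintext c b_priv_key) := by
  unfold Pre_decrypt_plaintext; infer_instance

def pvWitness_decrypt_plaintext : String × (List (String × String)) :=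
  ("205 72", [("3233", "17"), ("3233", "2753")])

def Spec_decrypt_plaintext (c : String) (b_priv_key : List (String × String)) (out : String) : Prop := out = decrypt_plaintext_alt c b_priv_key
instance (c : String) (b_priv_key : List (String × String)) (out : String) : Decidable (Spec_decrypt_plaintext c b_priv_key out) := by unfold Spec_decrypt_plaintext; infer_instance

-- ===== CLAIM (what is proved, stated in full; the proofs are below) =====
def Claim_equal_decrypt_plaintext : Prop := ∀ (c : String) (b_priv_key : List (String × String)), Dom_decrypt_plaintext c b_priv_key → Pre_decrypt_plaintext c b_priv_key → Spec_decrypt_plaintext c b_priv_key (decrypt_plaintext c b_priv_key)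

-- ===== LEMMAS AND PROOFS =====

-- str(n) for a natural number, as structural recursion (most significant digit first)
def pvDigs (n : Nat) : List Char :=
  if _h : n < 10 then [Nat.digitChar n] else pvDigs (n / 10) ++ [Nat.digitChar (n % 10)]
decreasing_by omega

theorem pvDigs_step (n : Nat) (h : ¬ n < 10) :
    pvDigs n = pvDigs (n / 10) ++ [Nat.digitChar (n % 10)] := by
  rw [pvDigs, dif_neg h]

theorem pvToDigitsCore_eq (fuel : Nat) : ∀ n ds, n < fuel →
    Nat.toDigitsCore 10 fuel n ds = pvDigs n ++ ds := by
  induction fuel with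
  | zero => omega
  | succ fuel ih =>
    intro n ds hn
    rw [Nat.toDigitsCore]
    by_cases h : n / 10 = 0
    · simp only [h]
      rw [pvDigs, dif_pos (by omega)]
      have : n % 10 = n := by omega
      simp [this]
    · have h10 : ¬ n < 10 := by omega
      have hfuel : n / 10 < fuel := by omega
      rw [if_neg h, ih (n / 10) _ hfuel, pvDigs_step n h10, List.append_assoc]
      rfl

theorem pvToChars_natCast (k : Nat) : PySem.Int.toChars (k : Int) = pvDigs k := by
  simp only [PySem.Int.toChars]
  rw [if_neg (by omega)]
  simp only [Int.toNat_natCast]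
  rw [Nat.toDigits, pvToDigitsCore_eq (k + 1) k [] (by omega), List.append_nil]

theorem pvPad_spec (s : List Char) : pvPad s = if s.length % 2 = 0 then s else '0' :: s := by
  rw [pvPad, PySem.List.len_eq, PySem.Int.mod_eq_emod_of_pos (by norm_num)]
  split_ifs with h1 h2 <;> first | rfl | (exfalso; omega)

theorem pvPad_even (s : List Char) : (pvPad s).length % 2 = 0 := by
  rw [pvPad_spec]
  by_cases h : s.length % 2 = 0
  · rw [if_pos h]; exact h
  · rw [if_neg h, List.length_cons]; omega

theorem pvChunk_append : ∀ x y : List Char, x.length % 2 = 0 →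
    pvChunkLoop (x ++ y) = pvChunkLoop x ++ pvChunkLoop y
  | [], y, _ => by simp [pvChunkLoop]
  | [a], y, h => by simp at h
  | a :: b :: rest, y, h => by
    simp only [List.cons_append, pvChunkLoop, List.append_assoc]
    rw [pvChunk_append rest y (by simp only [List.length_cons] at h; omega)]

-- the arithmetic code → letter map (the value B computes for one base-100 digit)
def pvCodeChars (k : Nat) : List Char :=
  if 1 ≤ k ∧ k ≤ 27 then [if k = 27 then ' ' else Char.ofNat (64 + k)] else []

-- B's reversed letters list, recursively most-significant-digit first
def pvDecB (k : Nat) : List Char :=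
  if _h : k = 0 then [] else pvDecB (k / 100) ++ pvCodeChars (k % 100)
decreasing_by omega

theorem pvLettersLoop_reverse (k : Nat) : (pvLettersLoop (k : Int)).reverse = pvDecB k := by
  induction k using Nat.strong_induction_on with
  | _ k ih =>
    rw [pvLettersLoop, pvDecB]
    by_cases h : k = 0
    · simp [h]
    · rw [dif_neg (by omega), dif_neg h]
      have hm : PySem.Int.mod (k : Int) 100 = ((k % 100 : Nat) : Int) := by
        exact_mod_cast PySem.Int.mod_natCast k 100
      have hd : PySem.Int.floordiv (k : Int) 100 = ((k / 100 : Nat) : Int) := by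
        exact_mod_cast PySem.Int.floordiv_natCast k 100
      rw [hm, hd, List.reverse_append, ih (k / 100) (by omega)]
      congr 1
      rw [pvCodeChars]
      by_cases h1 : 1 ≤ k % 100 ∧ k % 100 ≤ 27
      · rw [if_pos (by exact_mod_cast h1), if_pos h1]
        by_cases h27 : k % 100 = 27
        · rw [if_pos (by exact_mod_cast h27), if_pos h27]; rfl
        · rw [if_neg (by exact_mod_cast h27), if_neg h27]
          rw [List.reverse_singleton]
          rfl
      · rw [if_neg (by push_cast; omega), if_neg h1]; rfl

-- the two-digit pair of a code below 100 scans ALPHA to exactly the arithmetic letter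
theorem pvScan_two_digits : ∀ k < 100,
    pvScanAlpha pvALPHA.items [Nat.digitChar (k / 10), Nat.digitChar (k % 10)] = pvCodeChars k := by
  decide

theorem pvPad_digs_lt_100 (k : Nat) (hk : k < 100) :
    pvPad (pvDigs k) = [Nat.digitChar (k / 10), Nat.digitChar (k % 10)] := by
  by_cases h : k < 10
  · rw [pvDigs, dif_pos h, pvPad_spec, if_neg (by simp)]
    have h1 : k / 10 = 0 := by omega
    have h2 : k % 10 = k := by omega
    rw [h1, h2]
    rfl
  · rw [pvDigs, dif_neg h, pvDigs, dif_pos (by omega), pvPad_spec, if_pos (by simp)]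
    rfl

theorem pvDigs_ge_100 (k : Nat) (hk : 100 ≤ k) :
    pvDigs k = pvDigs (k / 100) ++ [Nat.digitChar (k % 100 / 10), Nat.digitChar (k % 100 % 10)] := by
  rw [pvDigs, dif_neg (by omega), pvDigs, dif_neg (by omega)]
  have h1 : k / 10 / 10 = k / 100 := by omega
  have h2 : k / 10 % 10 = k % 100 / 10 := by omega
  have h3 : k % 10 = k % 100 % 10 := by omega
  rw [h1, h2, h3, List.append_assoc]
  rfl

theorem pvPad_append_two (x : List Char) (a b : Char) :
    pvPad (x ++ [a, b]) = pvPad x ++ [a, b] := by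
  rw [pvPad_spec, pvPad_spec]
  by_cases h : x.length % 2 = 0
  · rw [if_pos (by simp; omega), if_pos h]
  · rw [if_neg (by simp; omega), if_neg h]
    rfl

-- per-number equivalence: A's pad + chunk + ALPHA scan of str(k) = B's base-100 decode of k
theorem pvChunk_pad_digs (k : Nat) : pvChunkLoop (pvPad (pvDigs k)) = pvDecB k := by
  induction k using Nat.strong_induction_on with
  | _ k ih =>
    by_cases hk : k < 100
    · have hdec : pvDecB k = pvCodeChars k := by
        by_cases h0 : k = 0
        · subst h0; simp [pvDecB, pvCodeChars]
        · rw [pvDecB, dif_neg h0, pvDecB, dif_pos (by omega), List.nil_append]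
          congr 1
          omega
      rw [pvPad_digs_lt_100 k hk, hdec]
      simp only [pvChunkLoop, List.append_nil]
      exact pvScan_two_digits k hk
    · have hdec : pvDecB k = pvDecB (k / 100) ++ pvCodeChars (k % 100) := by
        rw [pvDecB, dif_neg (by omega)]
      rw [pvDigs_ge_100 k (by omega), pvPad_append_two,
          pvChunk_append _ _ (pvPad_even _), ih (k / 100) (by omega), hdec]
      congr 1
      simp only [pvChunkLoop, List.append_nil]
      exact pvScan_two_digits (k % 100) (by omega)

-- per-token piece equality under 0 < n
theorem pvPiece_eq (i : Int) (e : Nat) (n : Int) (hn : 0 < n) :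
    pvChunkLoop (pvPad (PySem.Int.toChars (PySem.Int.powMod i e n)))
      = (pvLettersLoop (PySem.Int.powMod i e n)).reverse := by
  have h0 : 0 ≤ PySem.Int.powMod i e n := PySem.Int.mod_nonneg _ hn
  have hk : PySem.Int.powMod i e n = ((PySem.Int.powMod i e n).toNat : Int) := by omega
  rw [hk, pvToChars_natCast, pvLettersLoop_reverse, pvChunk_pad_digs]

theorem pvFold_eq (d : Nat) (n : Int) (hn : 0 < n) :
    ∀ (toks : List (List Char)) (accA accB : List Char),
      accA.length % 2 = 0 → pvChunkLoop accA = accB →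
      pvChunkLoop (toks.foldl (fun acc t =>
        acc ++ pvPad (PySem.Int.toChars (PySem.Int.powMod ((PySem.Int.ofChars? t).getD 0) d n))) accA)
      = toks.foldl (fun acc t =>
        acc ++ (pvLettersLoop (PySem.Int.powMod ((PySem.Int.ofChars? t).getD 0) d n)).reverse) accB := by
  intro toks
  induction toks with
  | nil => intro accA accB _ h; simpa using h
  | cons t rest ih =>
    intro accA accB hev h
    simp only [List.foldl_cons]
    apply ih
    · simp only [List.length_append]
      have := pvPad_even (PySem.Int.toChars (PySem.Int.powMod ((PySem.Int.ofChars? t).getD 0) d n))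
      omega
    · rw [pvChunk_append _ _ hev, h, pvPiece_eq _ _ _ hn]

-- ===== VERDICT (by name: the statement is the Claim_ definition above) =====
theorem decrypt_plaintext_spec : Claim_equal_decrypt_plaintext := by
  intro c b_priv_key _ hpre
  have hn : 0 < (pvKeyND b_priv_key).1 := hpre.2.2.2.1
  exact congrArg String.ofList
    (pvFold_eq (pvKeyND b_priv_key).2.toNat (pvKeyND b_priv_key).1 hn (pvTokens c) [] [] rfl rfl)
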